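-- pv_equiv track=rewrite | github.com/jako24/Algorithimc-Thinking-Python-Solutions | 4_HalloweenProblem.py | solve
-- ===== SOURCE A (Python) =====
-- def solve(input_text):
--     # Process all five neighborhood descriptions
--     output = []
--
--     def process_neighborhood(neighborhood):
--         streets = neighborhood.split('|')
--         candies = 0
--         for street in streets:
--             houses = list(map(int, street.split()))
--             candies += sum(houses)  # Calculate the total candies collected from each street
--         min_streets = len(streets)
--         return min_streets, candies
--
--     input_lines = input_text.strip().split('\n')
--     for neighborhood_description in input_lines:
--         min_streets, candies_collected = process_neighborhood(neighborhood_description)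
--         output.append(f"{min_streets} {candies_collected}")
--
--     return output  # Return the results as a list of strings
-- ===== SOURCE B (Python) =====
-- def solve(input_text):
--     # Single character-level scan (a tokenizer automaton) over the stripped text plus a
--     # sentinel '\n': no split/replace/count calls, one state (streets, candies, buf).
--     out = []
--     streets, candies = 1, 0
--     buf = []
--     for c in input_text.strip() + '\n':
--         if c == '\n':
--             if buf:
--                 candies += int(''.join(buf))
--                 buf = []
--             out.append(f"{streets} {candies}")
--             streets, candies = 1, 0
--         elif c == '|':
--             if buf:
--                 candies += int(''.join(buf))
--                 buf = []
--             streets += 1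
--         elif c.isspace():
--             if buf:
--                 candies += int(''.join(buf))
--                 buf = []
--         else:
--             buf.append(c)
--     return out
-- ===== Notes on version B (the rewrite author's own statement) =====
-- stated objective: alternative
-- what changed: Replaces A's split-and-nested-loop parsing (strip/split('\n'), per line split('|'), per street split() and int-map) by a single character-level tokenizer automaton: one pass over the stripped text plus a sentinel newline, maintaining (streets, candies, token buffer) and flushing on '\n', '|' and whitespace; no split/replace/count calls at all.
import Mathlib
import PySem

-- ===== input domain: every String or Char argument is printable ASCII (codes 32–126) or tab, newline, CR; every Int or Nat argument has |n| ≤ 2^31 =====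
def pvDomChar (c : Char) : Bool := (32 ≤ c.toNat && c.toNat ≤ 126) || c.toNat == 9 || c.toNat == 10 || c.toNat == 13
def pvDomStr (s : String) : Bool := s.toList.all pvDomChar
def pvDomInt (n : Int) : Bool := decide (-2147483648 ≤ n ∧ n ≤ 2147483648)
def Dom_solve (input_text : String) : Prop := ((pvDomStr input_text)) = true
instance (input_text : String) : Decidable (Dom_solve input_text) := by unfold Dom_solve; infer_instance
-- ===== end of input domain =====

-- B replaces A's split-based nested loops by a single character-level tokenizer
-- automaton over the stripped text plus a sentinel newline; same cost, same value.

-- ===== PORT A =====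
-- process_neighborhood: split on '|', loop over streets, per street split and sum ints.
-- int(h) is PySem.Int.ofStr?; inside Pre_solve every token parses, so .getD 0 never fires.
def solveProcess (neighborhood : String) : Int × Int :=
  let streets := (PySem.Str.split? neighborhood "|").getD []   -- sep ≠ "", so split? is some
  let candies := streets.foldl (fun candies street =>
    let houses := (PySem.Str.split₀ street).map (fun h => (PySem.Int.ofStr? h).getD 0)
    candies + houses.sum) 0
  ((streets.length : Int), candies)

def solve (input_text : String) : List String :=
  let input_lines := (PySem.Str.split? (PySem.Str.strip input_text) "\n").getD []  -- sep ≠ ""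
  input_lines.foldl (fun output line =>
    let r := solveProcess line
    output ++ [PySem.Int.toStr r.1 ++ " " ++ PySem.Int.toStr r.2]) []

-- ===== PORT B =====
-- 'if buf: candies += int(''.join(buf)); buf = []'
def solveFlush (candies : Int) (buf : List Char) : Int × List Char :=
  if buf ≠ [] then (candies + (PySem.Int.ofStr? (String.ofList buf)).getD 0, []) else (candies, buf)

-- one step of the tokenizer automaton (the body of B's single for-loop)
def solveStep (st : List String × Int × Int × List Char) (c : Char) :
    List String × Int × Int × List Char :=
  let (out, streets, candies, buf) := st
  if c = '\n' then
    let (candies, buf) := solveFlush candies buf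
    (out ++ [PySem.Int.toStr streets ++ " " ++ PySem.Int.toStr candies], 1, 0, buf)
  else if c = '|' then
    let (candies, buf) := solveFlush candies buf
    (out, streets + 1, candies, buf)
  else if PySem.Chars.isspace c then
    let (candies, buf) := solveFlush candies buf
    (out, streets, candies, buf)
  else (out, streets, candies, buf ++ [c])

def solve_alt (input_text : String) : List String :=
  (((PySem.Str.strip input_text ++ "\n").toList).foldl solveStep ([], 1, 0, [])).1

-- ===== PRECONDITION & SPEC =====
-- Pre_solve excludes exactly the inputs where some token between separators is not a
-- valid int literal: there Python's int() raises ValueError (in A and in B alike).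
def Pre_solve (input_text : String) : Prop :=
  ((((PySem.Str.split? (PySem.Str.strip input_text) "\n").getD []).flatMap
      (fun line => PySem.Str.split₀ (PySem.Str.replace line "|" " "))).all
    (fun t => (PySem.Int.ofStr? t).isSome)) = true
instance (input_text : String) : Decidable (Pre_solve input_text) := by
  unfold Pre_solve; infer_instance
def pvWitness_solve : String := "1 2|3\n4|  5 6"

def Spec_solve (input_text : String) (out : List String) : Prop := out = solve_alt input_text
instance (input_text : String) (out : List String) : Decidable (Spec_solve input_text out) := by
  unfold Spec_solve; infer_instance

-- ===== CLAIM (what is proved, stated in full; the proofs are below) =====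
def Claim_equal_solve : Prop :=
  ∀ (input_text : String), Dom_solve input_text → Pre_solve input_text →
    Spec_solve input_text (solve input_text)

-- ===== LEMMAS AND PROOFS =====

-- '|' replaced by ' ': the character map
def pvSub (c : Char) : Char := if c = '|' then ' ' else c

-- token parsing, on char lists
def pvParse (p : List Char) : Int := (PySem.Int.ofChars? p).getD 0

-- split on a single separator char as (first piece, remaining pieces)
def pvSplitC (sep : Char) : List Char → List Char × List (List Char)
  | [] => ([], [])
  | c :: t =>
    let r := pvSplitC sep t
    if c = sep then ([], r.1 :: r.2) else (c :: r.1, r.2)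

-- tokenization spec of B's automaton: maximal runs of non-'|', non-whitespace chars
def pvToks (buf : List Char) : List Char → List (List Char)
  | [] => if buf ≠ [] then [buf] else []
  | c :: t =>
    if c = '|' ∨ PySem.Chars.isspace c = true then
      (if buf ≠ [] then buf :: pvToks [] t else pvToks [] t)
    else pvToks (buf ++ [c]) t

-- B's formatted line on raw chars
def pvFmt (p : List Char) : String :=
  PySem.Int.toStr ((1 : Int) + (p.count '|' : Int)) ++ " " ++
    PySem.Int.toStr (((pvToks [] p).map pvParse).sum)

theorem pv_splitOn_go (sep : Char) (fuel : Nat) :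
    ∀ (l cur : List Char) (acc : List (List Char)), l.length < fuel →
      PySem.Chars.splitOn.go [sep] fuel l cur acc =
        acc.reverse ++ (cur.reverse ++ (pvSplitC sep l).1) :: (pvSplitC sep l).2 := by
  induction fuel with
  | zero => intro l cur acc h; omega
  | succ n ih =>
    intro l cur acc h
    cases l with
    | nil => simp [PySem.Chars.splitOn.go, pvSplitC]
    | cons c t =>
      rw [PySem.Chars.splitOn.go]
      by_cases hc : c = sep
      · simp only [List.isPrefixOf, hc, beq_self_eq_true, Bool.true_and, if_pos,
          List.length_nil, List.drop_zero, List.length_cons, List.drop_succ_cons]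
        rw [ih t [] (cur.reverse :: acc) (by simpa using h)]
        simp [pvSplitC]
      · simp only [List.isPrefixOf, Bool.and_eq_true, beq_iff_eq]
        rw [if_neg (by simp; exact fun h' => hc h'.symm)]
        rw [ih t (c :: cur) acc (by simpa using h)]
        simp [pvSplitC, hc]

theorem pv_splitOn_char (sep : Char) (l : List Char) :
    PySem.Chars.splitOn l [sep] = (pvSplitC sep l).1 :: (pvSplitC sep l).2 := by
  rw [PySem.Chars.splitOn]
  rw [pv_splitOn_go sep (l.length + 1) l [] [] (by omega)]
  simp

theorem pv_splitC_len (sep : Char) (l : List Char) :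
    ((pvSplitC sep l).2).length = l.count sep := by
  induction l with
  | nil => simp [pvSplitC]
  | cons c t ih =>
    by_cases hc : c = sep <;> simp [pvSplitC, hc, ih]

-- reconstruction of a list from its split pieces
theorem pv_splitC_recons (sep : Char) (l : List Char) :
    l = (pvSplitC sep l).1 ++ ((pvSplitC sep l).2).flatMap (fun p => sep :: p) := by
  induction l with
  | nil => simp [pvSplitC]
  | cons c t ih =>
    by_cases hc : c = sep <;> simp [pvSplitC, hc] <;> exact ih

-- no separator survives inside a piece
theorem pv_splitC_no_sep (sep : Char) (l : List Char) :
    sep ∉ (pvSplitC sep l).1 ∧ ∀ p ∈ (pvSplitC sep l).2, sep ∉ p := by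
  induction l with
  | nil => simp [pvSplitC]
  | cons c t ih =>
    by_cases hc : c = sep
    · simp [pvSplitC, hc]
      exact ⟨ih.1, ih.2⟩
    · simp [pvSplitC, hc]
      refine ⟨⟨fun h => hc h.symm, ih.1⟩, ih.2⟩

theorem pv_map_sub (l : List Char) :
    l.map pvSub = (pvSplitC '|' l).1 ++ ((pvSplitC '|' l).2).flatMap (fun p => ' ' :: p) := by
  induction l with
  | nil => simp [pvSplitC]
  | cons c t ih =>
    by_cases hc : c = '|' <;> simp [pvSplitC, pvSub, hc, ih]

theorem pv_split0_go_acc (l : List Char) :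
    ∀ (cur : List Char) (acc : List (List Char)),
      PySem.Chars.split₀.go l cur acc = acc.reverse ++ PySem.Chars.split₀.go l cur [] := by
  induction l with
  | nil =>
    intro cur acc
    rw [PySem.Chars.split₀.go]
    conv_rhs => rw [PySem.Chars.split₀.go]
    split_ifs <;> simp
  | cons c t ih =>
    intro cur acc
    rw [PySem.Chars.split₀.go]
    conv_rhs => rw [PySem.Chars.split₀.go]
    split_ifs with h1 h2
    · rw [ih [] acc]
    · rw [ih [] (cur.reverse :: acc), ih [] [cur.reverse]]
      simp
    · rw [ih (c :: cur) acc]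

theorem pv_split0_space (b : List Char) :
    ∀ (a cur : List Char),
      PySem.Chars.split₀.go (a ++ ' ' :: b) cur [] =
        PySem.Chars.split₀.go a cur [] ++ PySem.Chars.split₀.go b [] [] := by
  intro a
  induction a with
  | nil =>
    intro cur
    simp only [List.nil_append]
    rw [PySem.Chars.split₀.go]   -- expands go [] cur [] on the right
    rw [PySem.Chars.split₀.go]   -- expands go (' ' :: b) cur [] on the left
    have hsp : PySem.Chars.isspace ' ' = true := by decide
    rw [if_pos hsp]
    split_ifs with h2 <;> simp [pv_split0_go_acc b [] [cur.reverse]]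
  | cons c t ih =>
    intro cur
    simp only [List.cons_append]
    rw [PySem.Chars.split₀.go]
    conv_rhs => rw [PySem.Chars.split₀.go]
    split_ifs with h1 h2
    · rw [ih []]
    · rw [pv_split0_go_acc (t ++ ' ' :: b) [] [cur.reverse],
        pv_split0_go_acc t [] [cur.reverse], ih []]
      simp
    · rw [ih (c :: cur)]

theorem pv_split0_append (a b : List Char) :
    PySem.Chars.split₀ (a ++ ' ' :: b) = PySem.Chars.split₀ a ++ PySem.Chars.split₀ b := by
  rw [PySem.Chars.split₀, PySem.Chars.split₀, PySem.Chars.split₀]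
  exact pv_split0_space b a []

theorem pv_split0_pieces (ts : List (List Char)) :
    ∀ (h : List Char),
      PySem.Chars.split₀ (h ++ ts.flatMap (fun p => ' ' :: p)) =
        PySem.Chars.split₀ h ++ ts.flatMap PySem.Chars.split₀ := by
  induction ts with
  | nil => intro h; simp
  | cons p rest ih =>
    intro h
    have hr : h ++ ((p :: rest).flatMap (fun q => ' ' :: q)) =
        h ++ ' ' :: (p ++ rest.flatMap (fun q => ' ' :: q)) := by simp
    rw [hr, pv_split0_append, ih p]
    simp

theorem pv_sum_flatMap (ts : List (List Char)) (f : List Char → Int) :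
    ((ts.flatMap PySem.Chars.split₀).map f).sum =
      (ts.map (fun cs => ((PySem.Chars.split₀ cs).map f).sum)).sum := by
  induction ts with
  | nil => simp
  | cons p rest ih => simp [ih]

-- equation shapes of PySem.Chars.split₀.go
theorem pv_go_nil (cur : List Char) :
    PySem.Chars.split₀.go [] cur [] = if cur = [] then [] else [cur.reverse] := by
  rw [PySem.Chars.split₀.go]
  by_cases hb : cur = [] <;> simp [hb]

theorem pv_go_flush (c : Char) (hsp : PySem.Chars.isspace c = true) (t cur : List Char) :
    PySem.Chars.split₀.go (c :: t) cur [] =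
      (if cur = [] then [] else [cur.reverse]) ++ PySem.Chars.split₀.go t [] [] := by
  rw [PySem.Chars.split₀.go, if_pos hsp]
  by_cases hb : cur = []
  · simp [hb]
  · rw [if_neg (by simp [hb])]
    rw [pv_split0_go_acc t [] [cur.reverse]]
    simp [hb]

theorem pv_go_keep (c : Char) (hsp : ¬ PySem.Chars.isspace c = true) (t cur : List Char)
    (acc : List (List Char)) :
    PySem.Chars.split₀.go (c :: t) cur acc = PySem.Chars.split₀.go t (c :: cur) acc := by
  rw [PySem.Chars.split₀.go, if_neg hsp]

-- B's tokenization spec equals Python's whitespace split of the '|'→' ' image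
theorem pv_toks_go (cs : List Char) :
    ∀ (buf : List Char),
      pvToks buf cs = PySem.Chars.split₀.go (cs.map pvSub) buf.reverse [] := by
  induction cs with
  | nil =>
    intro buf
    rw [pvToks]
    simp only [List.map_nil]
    rw [pv_go_nil]
    by_cases hb : buf = [] <;> simp [hb]
  | cons c t ih =>
    intro buf
    by_cases hfl : c = '|' ∨ PySem.Chars.isspace c = true
    · have hsp : PySem.Chars.isspace (pvSub c) = true := by
        rcases hfl with h | h
        · simp [pvSub, h]; decide
        · by_cases hbar : c = '|'
          · simp [pvSub, hbar]; decide
          · simpa [pvSub, hbar] using h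
      rw [pvToks, if_pos hfl]
      simp only [List.map_cons]
      rw [pv_go_flush (pvSub c) hsp]
      by_cases hb : buf = [] <;> simp [hb, ih []]
    · have hbar : ¬ c = '|' := fun h => hfl (Or.inl h)
      have hsp : ¬ PySem.Chars.isspace c = true := fun h => hfl (Or.inr h)
      have hsub : pvSub c = c := by simp [pvSub, hbar]
      rw [pvToks, if_neg hfl]
      simp only [List.map_cons, hsub]
      rw [pv_go_keep c hsp]
      rw [ih (buf ++ [c])]
      simp

-- B's automaton on one line block (line chars, no '\n', followed by the sentinel '\n')
theorem pv_auto_line (cs : List Char) :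
    ∀ (out : List String) (s cand : Int) (buf : List Char), '\n' ∉ cs →
      ((cs ++ ['\n']).foldl solveStep (out, s, cand, buf)) =
        (out ++ [PySem.Int.toStr (s + (cs.count '|' : Int)) ++ " " ++
          PySem.Int.toStr (cand + ((pvToks buf cs).map pvParse).sum)], 1, 0, []) := by
  induction cs with
  | nil =>
    intro out s cand buf _
    simp only [List.nil_append, List.foldl_cons, List.foldl_nil, solveStep, solveFlush, pvToks]
    by_cases hb : buf = []
    · simp [hb]
    · simp [hb, pvParse, PySem.Int.ofStr?]
  | cons c t ih =>
    intro out s cand buf hnl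
    have hcnl : ¬ c = '\n' := fun h => hnl (by simp [h])
    have htnl : '\n' ∉ t := fun h => hnl (by simp [h])
    simp only [List.cons_append, List.foldl_cons, solveStep, solveFlush]
    rw [if_neg hcnl]
    by_cases hbar : c = '|'
    · rw [if_pos hbar]
      by_cases hb : buf = []
      · rw [if_neg (by simp [hb])]
        rw [ih out (s + 1) cand buf htnl]
        rw [pvToks, if_pos (Or.inl hbar), if_neg (by simp [hb])]
        simp only [List.count_cons, hbar, beq_self_eq_true, if_true]
        have e1 : s + (((t.count '|') + 1 : Nat) : Int) = s + 1 + (t.count '|' : Int) := by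
          push_cast; ring
        rw [e1]
        simp [hb]
      · rw [if_pos (by simp [hb])]
        rw [ih out (s + 1) (cand + (PySem.Int.ofStr? (String.ofList buf)).getD 0) [] htnl]
        rw [pvToks, if_pos (Or.inl hbar), if_pos (by simp [hb])]
        simp only [List.count_cons, hbar, beq_self_eq_true, if_true, List.map_cons, List.sum_cons]
        have e1 : s + (((t.count '|') + 1 : Nat) : Int) = s + 1 + (t.count '|' : Int) := by
          push_cast; ring
        have e2 : cand + (pvParse buf + ((pvToks [] t).map pvParse).sum) =
            cand + (PySem.Int.ofStr? (String.ofList buf)).getD 0 +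
              ((pvToks [] t).map pvParse).sum := by
          simp [pvParse, PySem.Int.ofStr?]; ring
        rw [e1, e2]
    · rw [if_neg hbar]
      by_cases hsp : PySem.Chars.isspace c = true
      · rw [if_pos hsp]
        by_cases hb : buf = []
        · rw [if_neg (by simp [hb])]
          rw [ih out s cand buf htnl]
          rw [pvToks, if_pos (Or.inr hsp), if_neg (by simp [hb])]
          simp [hbar, hb]
        · rw [if_pos (by simp [hb])]
          rw [ih out s (cand + (PySem.Int.ofStr? (String.ofList buf)).getD 0) [] htnl]
          rw [pvToks, if_pos (Or.inr hsp), if_pos (by simp [hb])]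
          simp only [List.count_cons, List.map_cons, List.sum_cons]
          have e2 : cand + (pvParse buf + ((pvToks [] t).map pvParse).sum) =
            cand + (PySem.Int.ofStr? (String.ofList buf)).getD 0 +
              ((pvToks [] t).map pvParse).sum := by
            simp [pvParse, PySem.Int.ofStr?]; ring
          rw [e2]
          simp [hbar]
      · rw [if_neg hsp]
        rw [ih out s cand (buf ++ [c]) htnl]
        rw [pvToks, if_neg (by simp [hbar, hsp])]
        simp [hbar]

-- glue a list of line blocks
theorem pv_blocks (pieces : List (List Char)) :
    ∀ (out : List String), (∀ p ∈ pieces, '\n' ∉ p) →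
      ((pieces.flatMap (fun p => p ++ ['\n'])).foldl solveStep (out, 1, 0, [])) =
        (out ++ pieces.map pvFmt, 1, 0, []) := by
  induction pieces with
  | nil => intro out _; simp
  | cons p rest ih =>
    intro out h
    have hp : '\n' ∉ p := h p (by simp)
    rw [List.flatMap_cons, List.foldl_append]
    rw [pv_auto_line p out 1 0 [] hp]
    rw [ih _ (fun q hq => h q (by simp [hq]))]
    simp [pvFmt]

-- first ++ sep-interleaved rest ++ [sep]  =  blocks
theorem pv_recons_blocks (sep : Char) (rest : List (List Char)) :
    ∀ (first : List Char),
      first ++ (rest.flatMap (fun p => sep :: p)) ++ [sep] =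
        (first :: rest).flatMap (fun p => p ++ [sep]) := by
  induction rest with
  | nil => intro first; simp
  | cons r rs ih =>
    intro first
    simp only [List.flatMap_cons] at *
    rw [← ih r]
    simp

-- per-line equality: A's formatted line on ofList p equals B's pvFmt p
theorem pv_line (p : List Char) :
    (PySem.Int.toStr (solveProcess (String.ofList p)).1 ++ " " ++
      PySem.Int.toStr (solveProcess (String.ofList p)).2) = pvFmt p := by
  have hbar : ("|" : String).toList = ['|'] := rfl
  have hsplit : (PySem.Str.split? (String.ofList p) "|").getD [] =
      ((pvSplitC '|' p).1 :: (pvSplitC '|' p).2).map String.ofList := by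
    rw [PySem.Str.split?, PySem.Chars.split?, hbar]
    simp [pv_splitOn_char]
  have hparse : ∀ cs : List Char,
      (PySem.Str.split₀ (String.ofList cs)).map (fun t => (PySem.Int.ofStr? t).getD 0) =
        (PySem.Chars.split₀ cs).map pvParse := by
    intro cs
    rw [PySem.Str.split₀]
    simp [PySem.Int.ofStr?, pvParse, String.toList_ofList, List.map_map, Function.comp]
  have h1 : (solveProcess (String.ofList p)).1 = (1 : Int) + (p.count '|' : Int) := by
    show ((((PySem.Str.split? (String.ofList p) "|").getD []).length : Int)) = _
    rw [hsplit]
    simp [pv_splitC_len]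
    ring
  have h2 : (solveProcess (String.ofList p)).2 = ((pvToks [] p).map pvParse).sum := by
    show ((((PySem.Str.split? (String.ofList p) "|").getD []).foldl (fun candies street =>
        candies + ((PySem.Str.split₀ street).map (fun h => (PySem.Int.ofStr? h).getD 0)).sum) 0)) = _
    rw [hsplit, PySem.List.foldl_add]
    rw [pv_toks_go p []]
    have : (p.map pvSub) = (pvSplitC '|' p).1 ++
        ((pvSplitC '|' p).2).flatMap (fun q => ' ' :: q) := pv_map_sub p
    rw [show PySem.Chars.split₀.go (p.map pvSub) [].reverse [] =
        PySem.Chars.split₀ (p.map pvSub) from rfl]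
    rw [this, pv_split0_pieces, List.map_append, List.sum_append, pv_sum_flatMap]
    simp [List.map_map, Function.comp_def, hparse]
  rw [h1, h2, pvFmt]

-- ===== VERDICT (by name: the statement is the Claim_ definition above) =====
theorem solve_spec : Claim_equal_solve := by
  intro input_text _ _
  unfold Spec_solve solve solve_alt
  rw [PySem.List.foldl_append_singleton_eq_map]
  simp only [List.nil_append]
  -- both sides through the '\n'-split of the stripped text
  set l := (PySem.Str.strip input_text).toList with hl
  have hnl : ("\n" : String).toList = ['\n'] := rfl
  have hlines : (PySem.Str.split? (PySem.Str.strip input_text) "\n").getD [] =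
      ((pvSplitC '\n' l).1 :: (pvSplitC '\n' l).2).map String.ofList := by
    rw [PySem.Str.split?, PySem.Chars.split?, hnl]
    simp [pv_splitOn_char, hl]
  have htoks : (PySem.Str.strip input_text ++ "\n").toList =
      ((pvSplitC '\n' l).1 :: (pvSplitC '\n' l).2).flatMap (fun p => p ++ ['\n']) := by
    rw [← pv_recons_blocks '\n' (pvSplitC '\n' l).2 (pvSplitC '\n' l).1]
    rw [← pv_splitC_recons '\n' l]
    simp [hl]
  rw [hlines, htoks]
  rw [pv_blocks _ [] (by
    intro p hp
    rcases List.mem_cons.mp hp with h | h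
    · exact h ▸ (pv_splitC_no_sep '\n' l).1
    · exact (pv_splitC_no_sep '\n' l).2 p h)]
  simp only [List.nil_append, List.map_map]
  exact List.map_congr_left (fun p _ => pv_line p)
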